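-- pv_equiv track=rewrite | github.com/NiquiniNiwi/BCC402 | Atividade-8/main.py | inversions_and_blank_row_from_bottom
-- ===== SOURCE A (Python) =====
-- def inversions_and_blank_row_from_bottom(board):
--     arr = [x for x in board if x != 0] #Cria uma lista arr com todos os números do puzzle, menos o 0
--     inv = 0
--     for i in range(len(arr)): #Calcula o número de inversões
--         ai = arr[i]
--         for j in range(i+1, len(arr)):
--             if arr[j] < ai:
--                 inv += 1
--     idx0 = board.index(0) #posição (índice) do espaço vazio no tabuleiro.
--     r0 = idx0 // 4 #Converte o índice em linha (0 a 3)
--     row_from_bottom = 4 - r0  # 1 (fundo) .. 4 (topo)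
--     return inv, row_from_bottom #Retorna o número de inversões e a posição do zero (em relação ao fundo)
-- ===== SOURCE B (Python) =====
-- def inversions_and_blank_row_from_bottom(board):
--     arr = [x for x in board if x != 0]
--
--     def msort(xs):
--         # returns (sorted copy of xs, number of inversions in xs)
--         if len(xs) <= 1:
--             return xs, 0
--         mid = len(xs) // 2
--         left, cl = msort(xs[:mid])
--         right, cr = msort(xs[mid:])
--         merged = []
--         inv = cl + cr
--         i = 0
--         j = 0
--         while i < len(left) and j < len(right):
--             if right[j] < left[i]:
--                 inv += len(left) - i
--                 merged.append(right[j])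
--                 j += 1
--             else:
--                 merged.append(left[i])
--                 i += 1
--         merged.extend(left[i:])
--         merged.extend(right[j:])
--         return merged, inv
--
--     _, inv = msort(arr)
--     r0 = board.index(0) // 4
--     return inv, 4 - r0
-- ===== Notes on version B (the rewrite author's own statement) =====
-- stated objective: alternative
-- what changed: The nested-index double loop over arr is replaced by a recursive merge sort that counts, while merging, the remaining left-half elements for each strictly smaller element taken from the right half; the blank-row line is unchanged.
-- outside the precondition, e.g. on inversions_and_blank_row_from_bottom([1, 2, 3]): A raises ValueError, B raises ValueError
import Mathlib
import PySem

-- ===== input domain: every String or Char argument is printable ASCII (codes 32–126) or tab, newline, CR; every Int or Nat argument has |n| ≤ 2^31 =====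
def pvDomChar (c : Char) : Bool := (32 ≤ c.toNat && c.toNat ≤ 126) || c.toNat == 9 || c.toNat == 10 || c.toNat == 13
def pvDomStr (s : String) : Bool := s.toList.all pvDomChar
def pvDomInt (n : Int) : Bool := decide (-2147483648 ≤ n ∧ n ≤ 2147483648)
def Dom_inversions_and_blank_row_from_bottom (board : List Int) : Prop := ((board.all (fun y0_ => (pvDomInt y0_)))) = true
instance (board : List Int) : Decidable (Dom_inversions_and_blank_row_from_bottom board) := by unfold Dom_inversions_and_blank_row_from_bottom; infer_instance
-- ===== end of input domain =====

-- B replaces A's nested-index inversion count by a merge sort that counts cross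
-- inversions while merging (objective: alternative algorithm; speed not measured here).


-- ===== PORT A =====
def inversions_and_blank_row_from_bottom (board : List Int) : Int × Int :=
  let arr := board.filter (fun x => x != 0)
  let inv : Int :=
    (PySem.List.pyRange 0 (PySem.List.len arr)).foldl (fun inv i =>
      let ai := PySem.List.pyGetD arr i 0
      (PySem.List.pyRange (i + 1) (PySem.List.len arr)).foldl (fun inv j =>
        if PySem.List.pyGetD arr j 0 < ai then inv + 1 else inv) inv) 0
  -- board.index(0): raises ValueError when 0 ∉ board — excluded by Pre_; the default 0 is unreachable there
  let idx0 : Int := ((PySem.List.index? board 0).getD 0 : Nat)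
  let r0 := PySem.Int.floordiv idx0 4
  (inv, 4 - r0)

-- ===== PORT B =====
-- merge loop of Source B: structural on the two lists; `inv += len(left) - i` is the length of the remaining left part
def pvMerge : List Int → List Int → List Int × Int
  | [], r => (r, 0)
  | l, [] => (l, 0)
  | a :: l, b :: r =>
    if b < a then
      let p := pvMerge (a :: l) r
      (b :: p.1, p.2 + PySem.List.len (a :: l))
    else
      let p := pvMerge l (b :: r)
      (a :: p.1, p.2)
termination_by l r => l.length + r.length

-- msort of Source B; xs[:mid] / xs[mid:] with 0 ≤ mid ≤ len(xs) are exactly List.take / List.drop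
def pvMsort (xs : List Int) : List Int × Int :=
  if xs.length ≤ 1 then (xs, 0)
  else
    let mid := xs.length / 2
    let L := pvMsort (xs.take mid)
    let R := pvMsort (xs.drop mid)
    let M := pvMerge L.1 R.1
    (M.1, L.2 + R.2 + M.2)
termination_by xs.length
decreasing_by
  · simp only [List.length_take]; omega
  · simp only [List.length_drop]; omega

def inversions_and_blank_row_from_bottom_alt (board : List Int) : Int × Int :=
  let arr := board.filter (fun x => x != 0)
  let inv := (pvMsort arr).2
  -- board.index(0): raises ValueError when 0 ∉ board — excluded by Pre_; the default 0 is unreachable there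
  let idx0 : Int := ((PySem.List.index? board 0).getD 0 : Nat)
  let r0 := PySem.Int.floordiv idx0 4
  (inv, 4 - r0)

-- ===== PRECONDITION & SPEC =====
-- Pre_: board must contain the blank (0); otherwise board.index(0) raises ValueError in both A and B.
def Pre_inversions_and_blank_row_from_bottom (board : List Int) : Prop := (0 : Int) ∈ board
instance (board : List Int) : Decidable (Pre_inversions_and_blank_row_from_bottom board) := by unfold Pre_inversions_and_blank_row_from_bottom; infer_instance
def pvWitness_inversions_and_blank_row_from_bottom : List Int := [3, 1, 0, 2]

def Spec_inversions_and_blank_row_from_bottom (board : List Int) (out : Int × Int) : Prop := out = inversions_and_blank_row_from_bottom_alt board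
instance (board : List Int) (out : Int × Int) : Decidable (Spec_inversions_and_blank_row_from_bottom board out) := by unfold Spec_inversions_and_blank_row_from_bottom; infer_instance

-- ===== CLAIM (what is proved, stated in full; the proofs are below) =====
def Claim_equal_inversions_and_blank_row_from_bottom : Prop := ∀ (board : List Int), Dom_inversions_and_blank_row_from_bottom board → Pre_inversions_and_blank_row_from_bottom board → Spec_inversions_and_blank_row_from_bottom board (inversions_and_blank_row_from_bottom board)

-- ===== LEMMAS AND PROOFS =====

-- number of inversions, structurally
def pvInvN : List Int → Nat
  | [] => 0
  | a :: t => t.countP (fun b => decide (b < a)) + pvInvN t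

-- cross inversions between l and r (pairs a ∈ l, b ∈ r with b < a)
def pvCrossN (l r : List Int) : Nat := (r.map (fun b => l.countP (fun a => decide (b < a)))).sum

theorem pvCrossN_nil (l : List Int) : pvCrossN l [] = 0 := rfl

theorem pvCrossN_cons_right (l : List Int) (b : Int) (r : List Int) :
    pvCrossN l (b :: r) = l.countP (fun a => decide (b < a)) + pvCrossN l r := by
  simp [pvCrossN]

theorem pvCrossN_cons_left (a : Int) (l r : List Int) :
    pvCrossN (a :: l) r = r.countP (fun b => decide (b < a)) + pvCrossN l r := by
  induction r with
  | nil => simp [pvCrossN]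
  | cons b r ih =>
    simp only [pvCrossN_cons_right, ih, List.countP_cons]
    by_cases h : b < a <;> simp [h] <;> omega

theorem pvCrossN_cons_left_of_ge (a : Int) (l r : List Int) (h : ∀ y ∈ r, ¬ y < a) :
    pvCrossN (a :: l) r = pvCrossN l r := by
  induction r with
  | nil => rfl
  | cons b r ih =>
    have hb := h b (by simp)
    simp only [pvCrossN_cons_right, List.countP_cons, ih (fun y hy => h y (by simp [hy]))]
    simp [hb]

theorem pvCrossN_perm_left {l l' : List Int} (r : List Int) (h : l.Perm l') :
    pvCrossN l r = pvCrossN l' r := by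
  simp only [pvCrossN]
  congr 1
  exact List.map_congr_left (fun b _ => h.countP_eq _)

theorem pvCrossN_perm_right (l : List Int) {r r' : List Int} (h : r.Perm r') :
    pvCrossN l r = pvCrossN l r' := by
  exact (h.map _).sum_eq

theorem pvInvN_append (l r : List Int) :
    pvInvN (l ++ r) = pvInvN l + pvInvN r + pvCrossN l r := by
  induction l with
  | nil => simp [pvInvN, pvCrossN]
  | cons a l ih =>
    simp only [List.cons_append, pvInvN, List.countP_append, ih, pvCrossN_cons_left]
    omega

-- merge specification: permutation, sortedness, and the counted cross inversions
theorem pvMerge_spec : ∀ (l r : List Int), l.Pairwise (· ≤ ·) → r.Pairwise (· ≤ ·) →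
    (pvMerge l r).1.Perm (l ++ r) ∧ (pvMerge l r).1.Pairwise (· ≤ ·) ∧
    (pvMerge l r).2 = (pvCrossN l r : Int)
  | [], r, _, hr => by simp [pvMerge, hr, pvCrossN]
  | a :: l, [], hl, _ => by simp [pvMerge, hl, pvCrossN_nil]
  | a :: l, b :: r, hl, hr => by
    by_cases h : b < a
    · have ih := pvMerge_spec (a :: l) r hl hr.of_cons
      obtain ⟨hperm, hsort, hcnt⟩ := ih
      have hall : ∀ x ∈ a :: l, b < x := by
        intro x hx
        rcases List.mem_cons.mp hx with rfl | hx
        · exact h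
        · exact lt_of_lt_of_le h (List.rel_of_pairwise_cons hl hx)
      refine ⟨?_, ?_, ?_⟩
      · simp only [pvMerge, if_pos h]
        exact (hperm.cons b).trans List.perm_middle.symm
      · simp only [pvMerge, if_pos h]
        refine List.Pairwise.cons ?_ hsort
        intro x hx
        rcases (List.Perm.mem_iff hperm).mp hx with hx'
        rcases List.mem_append.mp hx' with hx'' | hx''
        · exact le_of_lt (hall x hx'')
        · exact List.rel_of_pairwise_cons hr hx''
      · simp only [pvMerge, if_pos h, hcnt, pvCrossN_cons_right, PySem.List.len]
        have hcp : (a :: l).countP (fun x => decide (b < x)) = (a :: l).length := by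
          rw [List.countP_eq_length]
          intro x hx; exact decide_eq_true (hall x hx)
        rw [hcp]
        push_cast
        ring
    · have ih := pvMerge_spec l (b :: r) hl.of_cons hr
      obtain ⟨hperm, hsort, hcnt⟩ := ih
      have hab : a ≤ b := le_of_not_gt h
      refine ⟨?_, ?_, ?_⟩
      · simp only [pvMerge, if_neg h]
        exact hperm.cons a
      · simp only [pvMerge, if_neg h]
        refine List.Pairwise.cons ?_ hsort
        intro x hx
        rcases (List.Perm.mem_iff hperm).mp hx with hx'
        rcases List.mem_append.mp hx' with hx'' | hx''
        · exact List.rel_of_pairwise_cons hl hx''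
        · rcases List.mem_cons.mp hx'' with rfl | hx3
          · exact hab
          · exact le_trans hab (List.rel_of_pairwise_cons hr hx3)
      · simp only [pvMerge, if_neg h, hcnt]
        congr 1
        refine (pvCrossN_cons_left_of_ge a l (b :: r) ?_).symm
        intro y hy
        rcases List.mem_cons.mp hy with rfl | hy'
        · omega
        · have := List.rel_of_pairwise_cons hr hy'
          omega
termination_by l r => l.length + r.length

theorem pvMsort_spec (xs : List Int) :
    (pvMsort xs).1.Perm xs ∧ (pvMsort xs).1.Pairwise (· ≤ ·) ∧
    (pvMsort xs).2 = (pvInvN xs : Int) := by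
  by_cases h : xs.length ≤ 1
  · match xs, h with
    | [], _ => simp [pvMsort, pvInvN]
    | [x], _ => simp [pvMsort, pvInvN]
  · have h2 : 2 ≤ xs.length := by omega
    have hmid1 : 1 ≤ xs.length / 2 := by omega
    have hmid2 : xs.length / 2 < xs.length := by omega
    have ihL := pvMsort_spec (xs.take (xs.length / 2))
    have ihR := pvMsort_spec (xs.drop (xs.length / 2))
    obtain ⟨pL, sL, cL⟩ := ihL
    obtain ⟨pR, sR, cR⟩ := ihR
    obtain ⟨pM, sM, cM⟩ := pvMerge_spec _ _ sL sR
    rw [pvMsort, if_neg h]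
    refine ⟨?_, sM, ?_⟩
    · show (pvMerge (pvMsort (xs.take (xs.length / 2))).1 (pvMsort (xs.drop (xs.length / 2))).1).1.Perm xs
      refine pM.trans ((pL.append pR).trans ?_)
      rw [List.take_append_drop]
    · show (pvMsort (xs.take (xs.length / 2))).2 + (pvMsort (xs.drop (xs.length / 2))).2
          + (pvMerge (pvMsort (xs.take (xs.length / 2))).1 (pvMsort (xs.drop (xs.length / 2))).1).2
          = (pvInvN xs : Int)
      rw [cL, cR, cM]
      have hx : pvInvN xs = pvInvN (xs.take (xs.length / 2)) + pvInvN (xs.drop (xs.length / 2))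
          + pvCrossN (xs.take (xs.length / 2)) (xs.drop (xs.length / 2)) := by
        conv_lhs => rw [← List.take_append_drop (xs.length / 2) xs]
        exact pvInvN_append _ _
      have hc : pvCrossN (pvMsort (xs.take (xs.length / 2))).1 (pvMsort (xs.drop (xs.length / 2))).1
          = pvCrossN (xs.take (xs.length / 2)) (xs.drop (xs.length / 2)) := by
        rw [pvCrossN_perm_left _ pL, pvCrossN_perm_right _ pR]
      rw [hc, hx]
      push_cast
      ring
termination_by xs.length
decreasing_by
  · simp only [List.length_take]; omega
  · simp only [List.length_drop]; omega

-- A's inner loop over range(i+1, len(arr)) counts the later smaller elements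
theorem pvInner (arr : List Int) (ai : Int) (i : Nat) (acc : Int) :
    (PySem.List.pyRange ((i : Int)) (PySem.List.len arr)).foldl
      (fun inv j => if PySem.List.pyGetD arr j 0 < ai then inv + 1 else inv) acc
    = acc + ((arr.drop i).countP (fun b => decide (b < ai)) : Int) := by
  have h := PySem.List.foldl_pyRange_pyGetD arr 0
    (fun (inv : Int) (b : Int) => if b < ai then inv + 1 else inv) acc
    (a := (i : Int)) (by positivity)
  simp only [Int.toNat_natCast] at h
  rw [h, ← PySem.List.foldl_count_if (fun b => decide (b < ai))]
  simp

-- A's outer loop from index i computes the inversions of the suffix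
theorem pvOuter (arr : List Int) : ∀ (k i : Nat), arr.length - i ≤ k → ∀ (acc : Int),
    (PySem.List.pyRange ((i : Int)) (PySem.List.len arr)).foldl
      (fun inv i =>
        let ai := PySem.List.pyGetD arr i 0
        (PySem.List.pyRange (i + 1) (PySem.List.len arr)).foldl
          (fun inv j => if PySem.List.pyGetD arr j 0 < ai then inv + 1 else inv) inv) acc
    = acc + (pvInvN (arr.drop i) : Int) := by
  intro k
  induction k with
  | zero =>
    intro i hi acc
    have hlen : arr.length ≤ i := by omega
    have hnil : PySem.List.pyRange ((i : Int)) (PySem.List.len arr) = [] := by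
      simp [PySem.List.pyRange, PySem.List.len]; omega
    rw [hnil]
    simp [List.drop_eq_nil_of_le hlen, pvInvN]
  | succ k ih =>
    intro i hi acc
    by_cases hlt : i < arr.length
    · have hcons : PySem.List.pyRange ((i : Int)) (PySem.List.len arr)
          = (i : Int) :: PySem.List.pyRange ((i : Int) + 1) (PySem.List.len arr) := by
        apply PySem.List.pyRange_one_cons
        simp [PySem.List.len]; exact_mod_cast hlt
      rw [hcons]
      simp only [List.foldl_cons]
      have hcast : ((i : Int) + 1) = ((i + 1 : Nat) : Int) := by push_cast; ring
      rw [hcast, pvInner, ih (i + 1) (by omega)]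
      have hdrop : arr.drop i = arr[i] :: arr.drop (i + 1) := List.drop_eq_getElem_cons hlt
      have hget : PySem.List.pyGetD arr ((i : Int)) 0 = arr[i] := by
        rw [PySem.List.pyGetD_natCast]
        exact List.getD_eq_getElem arr 0 hlt
      rw [hget, hdrop]
      simp only [pvInvN]
      push_cast
      ring
    · have hlen : arr.length ≤ i := by omega
      have hnil : PySem.List.pyRange ((i : Int)) (PySem.List.len arr) = [] := by
        simp [PySem.List.pyRange, PySem.List.len]; omega
      rw [hnil]
      simp [List.drop_eq_nil_of_le hlen, pvInvN]

-- ===== VERDICT (by name: the statement is the Claim_ definition above) =====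
theorem inversions_and_blank_row_from_bottom_spec : Claim_equal_inversions_and_blank_row_from_bottom := by
  intro board _hdom _hpre
  unfold Spec_inversions_and_blank_row_from_bottom
  unfold inversions_and_blank_row_from_bottom inversions_and_blank_row_from_bottom_alt
  simp only []
  congr 1
  · have hA := pvOuter (board.filter (fun x => x != 0)) (board.filter (fun x => x != 0)).length 0
      (by omega) 0
    simp only [Nat.cast_zero, List.drop_zero, zero_add] at hA
    rw [hA]
    exact ((pvMsort_spec (board.filter (fun x => x != 0))).2.2).symm
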